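-- pv_equiv track=rewrite | github.com/tahtaciburak/ctwavelet | ctwavelet/LiftingScheme.py | __parse_coeffs
-- ===== SOURCE A (Python) =====
-- import math
--
-- def __parse_coeffs(array):
--     last = []
--     index = 1
--     last.append([array[0]])
--     for item in range(int(math.log2(len(array)))):
--         last.append(array[index:index + 2 ** item])
--         index = index + 2 ** item
--     return last
-- ===== SOURCE B (Python) =====
-- import math
--
-- def __parse_coeffs(array):
--     levels = int(math.log2(len(array)))
--     out = [[array[0]]]
--     chunk = []
--     cap = 1
--     for x in array[1:1 << levels]:
--         chunk.append(x)
--         if len(chunk) == cap: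
--             out.append(chunk)
--             chunk = []
--             cap *= 2
--     return out
-- ===== Notes on version B (the rewrite author's own statement) =====
-- stated objective: alternative
-- what changed: Replaces A's per-level slicing with a running index by a single element-wise pass over the covered prefix that accumulates the current chunk and flushes it into the output whenever it reaches a doubling capacity.
import Mathlib
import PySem

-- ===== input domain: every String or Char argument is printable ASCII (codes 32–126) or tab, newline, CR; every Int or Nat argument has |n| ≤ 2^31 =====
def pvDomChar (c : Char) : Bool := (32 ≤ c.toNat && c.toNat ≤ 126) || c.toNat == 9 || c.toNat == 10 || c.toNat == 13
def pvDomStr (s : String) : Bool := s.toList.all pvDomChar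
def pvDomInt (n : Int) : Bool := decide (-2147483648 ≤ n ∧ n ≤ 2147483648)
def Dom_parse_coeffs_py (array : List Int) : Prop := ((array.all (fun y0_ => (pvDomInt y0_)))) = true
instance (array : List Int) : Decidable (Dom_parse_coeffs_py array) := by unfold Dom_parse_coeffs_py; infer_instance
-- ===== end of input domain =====

-- B replaces A's per-level slicing (loop-carried running index) by a single element-wise
-- pass that accumulates the current chunk and flushes it at a doubling capacity
-- (objective: alternative decomposition, same cost).

-- ===== PORT A =====
-- literal transliteration: state (last, index), loop over range(int(log2(len(array))))
def parse_coeffs_py (array : List Int) : List (List Int) :=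
  let last : List (List Int) := []
  let index : Int := 1
  let last := last ++ [[(PySem.List.pyGet? array 0).getD 0]]
  let st := (PySem.List.pyRange 0 (Nat.log 2 array.length : Int) 1).foldl
    (fun (st : List (List Int) × Int) item =>
      (st.1 ++ [PySem.List.slice array (some st.2) (some (st.2 + 2 ^ item.toNat))],
       st.2 + 2 ^ item.toNat))
    (last, index)
  st.1

-- ===== PORT B =====
-- transliteration of Source B: one pass over array[1:2^levels], state (out, chunk, cap);
-- append x to chunk, and when len(chunk) == cap flush the chunk and double cap.
def parse_coeffs_py_alt (array : List Int) : List (List Int) :=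
  let levels := Nat.log 2 array.length
  let st := (PySem.List.slice array (some 1) (some ((2 : Int) ^ levels))).foldl
    (fun (st : List (List Int) × List Int × Int) x =>
      let chunk := st.2.1 ++ [x]
      if ((chunk.length : Int) == st.2.2) then (st.1 ++ [chunk], [], st.2.2 * 2)
      else (st.1, chunk, st.2.2))
    ([[(PySem.List.pyGet? array 0).getD 0]], [], 1)
  st.1

-- ===== PRECONDITION & SPEC =====
-- Pre_ excludes the empty list, on which the Python A raises IndexError (array[0])
-- and B raises ValueError (math.log2(0)).
def Pre_parse_coeffs_py (array : List Int) : Prop := array ≠ []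
instance (array : List Int) : Decidable (Pre_parse_coeffs_py array) := by
  unfold Pre_parse_coeffs_py; infer_instance
def pvWitness_parse_coeffs_py : List Int := [1, 2, 3, 4]

def Spec_parse_coeffs_py (array : List Int) (out : List (List Int)) : Prop := out = parse_coeffs_py_alt array
instance (array : List Int) (out : List (List Int)) : Decidable (Spec_parse_coeffs_py array out) := by unfold Spec_parse_coeffs_py; infer_instance

-- ===== CLAIM (what is proved, stated in full; the proofs are below) =====
def Claim_equal_parse_coeffs_py : Prop := ∀ (array : List Int), Dom_parse_coeffs_py array → Pre_parse_coeffs_py array → Spec_parse_coeffs_py array (parse_coeffs_py array)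

-- ===== LEMMAS AND PROOFS =====

-- A's loop invariant: after n iterations the index equals 2^n and the accumulated
-- chunks are exactly the closed-form slices array[2^i : 2^(i+1)].
theorem parse_coeffs_loop (array : List Int) (n : Nat) (acc : List (List Int)) :
    (PySem.List.pyRange 0 (n : Int) 1).foldl
      (fun (st : List (List Int) × Int) item =>
        (st.1 ++ [PySem.List.slice array (some st.2) (some (st.2 + 2 ^ item.toNat))],
         st.2 + 2 ^ item.toNat))
      (acc, 1)
    = (acc ++ (List.range n).map
        (fun i => PySem.List.slice array (some ((2 : Int) ^ i)) (some ((2 : Int) ^ (i + 1)))),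
       (2 : Int) ^ n) := by
  induction n generalizing acc with
  | zero =>
    simp [PySem.List.pyRange_one_eq_nil]
  | succ n ih =>
    have hcast : ((n + 1 : Nat) : Int) = (n : Int) + 1 := by push_cast; ring
    rw [hcast, PySem.List.pyRange_one_succ_right (by positivity), List.foldl_append, ih]
    have htn : ((n : Int)).toNat = n := Int.toNat_natCast n
    simp only [List.foldl_cons, List.foldl_nil, htn, List.range_succ, List.map_append,
      List.map_cons, List.map_nil, List.append_assoc]
    have h2 : (2 : Int) ^ n + 2 ^ n = 2 ^ (n + 1) := by ring
    rw [h2]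

-- B's step function, named for the lemmas
def pvStepB (st : List (List Int) × List Int × Int) (x : Int) :
    List (List Int) × List Int × Int :=
  let chunk := st.2.1 ++ [x]
  if ((chunk.length : Int) == st.2.2) then (st.1 ++ [chunk], [], st.2.2 * 2)
  else (st.1, chunk, st.2.2)

-- flushing one full block: feeding ys into a partial chunk ch that exactly fills cap
theorem pvStepB_flush (ys : List Int) (ch : List Int) (out : List (List Int)) (cap : Int)
    (hys : ys ≠ []) (hcap : (ch.length : Int) + ys.length = cap) :
    ys.foldl pvStepB (out, ch, cap) = (out ++ [ch ++ ys], [], cap * 2) := by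
  induction ys generalizing ch with
  | nil => exact absurd rfl hys
  | cons y ys ih =>
    simp only [List.foldl_cons]
    rcases ys with _ | ⟨z, zs⟩
    · have h : (((ch ++ [y]).length : Int) = cap) := by
        simp only [List.length_append, List.length_cons, List.length_nil] at hcap ⊢
        push_cast at hcap ⊢; omega
      simp only [pvStepB, beq_iff_eq, if_pos h, List.foldl_nil]
    · have h : ¬ (((ch ++ [y]).length : Int) = cap) := by
        simp only [List.length_append, List.length_cons, List.length_nil] at hcap ⊢
        push_cast at hcap ⊢; omega
      simp only [pvStepB, beq_iff_eq, if_neg h]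
      rw [ih (ch ++ [y]) (by simp)
        (by simp only [List.length_append, List.length_cons, List.length_nil] at hcap ⊢
            push_cast at hcap ⊢; omega)]
      simp

-- B's main invariant: folding over the elements array[2^k : 2^(k+m)] (as drop/take),
-- starting with an empty chunk and cap = 2^k, emits exactly the blocks of sizes
-- 2^k, …, 2^(k+m-1), provided the array is long enough.
theorem pvB_main (array : List Int) (m k : Nat) (out : List (List Int))
    (hlen : 2 ^ (k + m) ≤ array.length) :
    ((array.drop (2 ^ k)).take (2 ^ (k + m) - 2 ^ k)).foldl pvStepB
      (out, [], ((2 : Int) ^ k))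
    = (out ++ (List.range m).map
        (fun j => (array.drop (2 ^ (k + j))).take (2 ^ (k + j))),
       [], (2 : Int) ^ (k + m)) := by
  induction m generalizing out with
  | zero => simp
  | succ m ih =>
    have hm : 2 ^ (k + m) ≤ array.length := le_trans (Nat.pow_le_pow_right (by norm_num) (by omega)) hlen
    have hsplit : (array.drop (2 ^ k)).take (2 ^ (k + (m + 1)) - 2 ^ k)
        = (array.drop (2 ^ k)).take (2 ^ (k + m) - 2 ^ k)
          ++ (array.drop (2 ^ (k + m))).take (2 ^ (k + m)) := by
      have h1 : 2 ^ k ≤ 2 ^ (k + m) := Nat.pow_le_pow_right (by norm_num) (by omega)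
      have h2 : 2 ^ (k + (m + 1)) = 2 ^ (k + m) + 2 ^ (k + m) := by
        rw [show k + (m + 1) = (k + m) + 1 by omega, pow_succ]; omega
      rw [h2]
      generalize 2 ^ k = b at h1 ⊢
      generalize 2 ^ (k + m) = P at h1 ⊢
      rw [show P + P - b = (P - b) + P by omega, List.take_add, List.drop_drop,
        show b + (P - b) = P by omega]
    rw [hsplit, List.foldl_append, ih out hm]
    have hblk : (array.drop (2 ^ (k + m))).take (2 ^ (k + m)) ≠ [] ∧
        ((array.drop (2 ^ (k + m))).take (2 ^ (k + m))).length = 2 ^ (k + m) := by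
      have hp : 0 < 2 ^ (k + m) := Nat.pow_pos (by norm_num)
      have h2 : 2 ^ (k + (m + 1)) = 2 ^ (k + m) + 2 ^ (k + m) := by
        rw [show k + (m + 1) = (k + m) + 1 by omega, pow_succ]; omega
      have hl : ((array.drop (2 ^ (k + m))).take (2 ^ (k + m))).length = 2 ^ (k + m) := by
        rw [List.length_take, List.length_drop]; omega
      refine ⟨?_, hl⟩
      intro hnil; rw [hnil] at hl; simp at hl; omega
    rw [pvStepB_flush _ [] _ _ hblk.1 (by rw [hblk.2]; push_cast; simp)]
    rw [List.range_succ, List.map_append]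
    simp only [List.map_cons, List.map_nil, List.nil_append, List.append_assoc, Prod.mk.injEq]
    refine ⟨by trivial, by trivial, ?_⟩
    rw [show k + (m + 1) = (k + m) + 1 by omega]
    ring

-- ===== VERDICT (by name: the statement is the Claim_ definition above) =====
theorem parse_coeffs_py_spec : Claim_equal_parse_coeffs_py := by
  intro array _ hpre
  unfold Spec_parse_coeffs_py parse_coeffs_py parse_coeffs_py_alt
  simp only [List.nil_append]
  rw [parse_coeffs_loop array (Nat.log 2 array.length) [[(PySem.List.pyGet? array 0).getD 0]]]
  set L := Nat.log 2 array.length with hL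
  have hlen : 2 ^ L ≤ array.length :=
    Nat.pow_log_le_self 2 (by cases array with | nil => exact absurd rfl hpre | cons a t => simp)
  have hmain := pvB_main array L 0 [[(PySem.List.pyGet? array 0).getD 0]]
    (by simpa using hlen)
  simp only [pow_zero, zero_add] at hmain
  have hfun : (fun (st : List (List Int) × List Int × Int) x =>
      let chunk := st.2.1 ++ [x]
      if ((chunk.length : Int) == st.2.2) then (st.1 ++ [chunk], [], st.2.2 * 2)
      else (st.1, chunk, st.2.2)) = pvStepB := rfl
  have hslice : PySem.List.slice array (some 1) (some ((2 : Int) ^ L))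
      = (array.drop 1).take (2 ^ L - 1) := by
    rw [show (1 : Int) = ((1 : Nat) : Int) from rfl,
        show (2 : Int) ^ L = ((2 ^ L : Nat) : Int) from by push_cast; ring,
        PySem.List.slice_natCast]
  rw [hslice, hfun, hmain]
  simp only [List.singleton_append]
  congr 1
  apply List.map_congr_left
  intro i hi
  have hc1 : (2 : Int) ^ i = ((2 ^ i : Nat) : Int) := by push_cast; ring
  have hc2 : (2 : Int) ^ (i + 1) = ((2 ^ (i + 1) : Nat) : Int) := by push_cast; ring
  rw [hc1, hc2, PySem.List.slice_natCast]
  congr 1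
  rw [pow_succ]; omega
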